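-- pv_equiv track=rewrite | github.com/pedropreto/CodeAdvent | 2023/day9.py | find_next_sequence_part2
-- ===== SOURCE A (Python) =====
-- def find_next_sequence_part2(sequence, first_elements):
--     new_sequence = [1] * (len(sequence) - 1)
--     for i in range(0, len(new_sequence)):
--         new_sequence[i] = sequence[i+1] - sequence[i]
--
--     if len(new_sequence) == 0:
--         first_elements = [0]
--     elif new_sequence != [0] * len(new_sequence):
--         first_elements.append(new_sequence[0])
--         new_sequence, first_elements = find_next_sequence_part2(new_sequence, first_elements)
--
--     return new_sequence, first_elements
-- ===== SOURCE B (Python) =====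
-- def find_next_sequence_part2(sequence, first_elements):
--     seq = sequence
--     while True:
--         ns = [b - a for a, b in zip(seq, seq[1:])]
--         if not ns:
--             return ns, [0]
--         if any(ns):
--             first_elements.append(ns[0])
--             seq = ns
--         else:
--             return ns, first_elements
-- ===== Notes on version B (the rewrite author's own statement) =====
-- stated objective: simpler
-- what changed: Replaced the recursion with a single while loop over the current row, computed each difference row with a zip comprehension instead of preallocating [1]*(n-1) and overwriting by index, and tested for an all-zero row with any(ns) instead of comparing against [0]*len(ns).
import Mathlib
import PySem

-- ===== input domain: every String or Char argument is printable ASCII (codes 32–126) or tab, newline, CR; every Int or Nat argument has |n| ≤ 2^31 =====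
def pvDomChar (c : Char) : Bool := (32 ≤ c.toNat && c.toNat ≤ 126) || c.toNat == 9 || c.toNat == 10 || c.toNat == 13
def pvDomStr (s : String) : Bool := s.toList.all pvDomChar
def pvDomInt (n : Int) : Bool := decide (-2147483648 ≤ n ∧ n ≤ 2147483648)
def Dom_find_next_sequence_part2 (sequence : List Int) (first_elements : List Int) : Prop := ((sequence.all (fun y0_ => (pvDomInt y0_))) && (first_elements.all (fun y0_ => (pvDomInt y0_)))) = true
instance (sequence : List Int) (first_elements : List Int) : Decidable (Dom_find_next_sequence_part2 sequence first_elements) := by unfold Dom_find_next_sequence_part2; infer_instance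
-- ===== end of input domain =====

-- B replaces A's recursion by a while loop with zip-comprehension difference rows and an any() zero test;
-- equivalence is about the RETURN value only (the Python A and B both append to first_elements in place).
-- ===== PORT A =====
-- the for-loop that overwrites the preallocated [1]*(n-1) row, entry by entry
def find_next_sequence_part2 (sequence : List Int) (first_elements : List Int) : List Int × List Int :=
  let new_sequence :=
    (List.range (sequence.length - 1)).map (fun i => sequence.getD (i + 1) 0 - sequence.getD i 0)
  if new_sequence.length = 0 then
    (new_sequence, [0])
  else if new_sequence ≠ List.replicate new_sequence.length 0 then
    find_next_sequence_part2 new_sequence (first_elements ++ [new_sequence.getD 0 0])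
  else
    (new_sequence, first_elements)
termination_by sequence.length
decreasing_by
  simp only [new_sequence, List.length_map, List.length_range] at *
  omega

-- ===== PORT B =====
-- the while loop: state (seq, first_elements); ns built by zipping seq with seq[1:]
def find_next_sequence_part2_alt (sequence : List Int) (first_elements : List Int) : List Int × List Int :=
  let ns := List.zipWith (fun a b => b - a) sequence (sequence.drop 1)
  if h : ns = [] then
    (ns, [0])
  else if ns.any (fun x => x ≠ 0) then
    find_next_sequence_part2_alt ns (first_elements ++ [ns.head h])
  else
    (ns, first_elements)
termination_by sequence.length
decreasing_by
  have hne : ns ≠ [] := by assumption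
  have hpos := List.length_pos_iff.mpr hne
  simp only [ns, List.length_zipWith, List.length_drop] at *
  omega

-- ===== PRECONDITION & SPEC =====
def Spec_find_next_sequence_part2 (sequence : List Int) (first_elements : List Int) (out : List Int × List Int) : Prop := out = find_next_sequence_part2_alt sequence first_elements
instance (sequence : List Int) (first_elements : List Int) (out : List Int × List Int) : Decidable (Spec_find_next_sequence_part2 sequence first_elements out) := by unfold Spec_find_next_sequence_part2; infer_instance

-- ===== CLAIM (what is proved, stated in full; the proofs are below) =====
def Claim_equal_find_next_sequence_part2 : Prop := ∀ (sequence : List Int) (first_elements : List Int), Dom_find_next_sequence_part2 sequence first_elements → Spec_find_next_sequence_part2 sequence first_elements (find_next_sequence_part2 sequence first_elements)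

-- ===== LEMMAS AND PROOFS =====

-- the two ways of building a difference row coincide
theorem pv_diffs_eq (seq : List Int) :
    (List.range (seq.length - 1)).map (fun i => seq.getD (i + 1) 0 - seq.getD i 0)
      = List.zipWith (fun a b => b - a) seq (seq.drop 1) := by
  apply List.ext_getElem
  · simp [List.length_zipWith]
  · intro i h1 h2
    simp only [List.length_map, List.length_range] at h1
    simp only [List.getElem_map, List.getElem_range, List.getElem_zipWith, List.getElem_drop]
    rw [List.getD_eq_getElem _ _ (by omega), List.getD_eq_getElem _ _ (by omega)]
    simp [Nat.add_comm]

theorem pv_any_ne_replicate (ns : List Int) :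
    (ns ≠ List.replicate ns.length 0) ↔ ns.any (fun x => x ≠ 0) = true := by
  rw [Ne, List.eq_replicate_iff]
  simp [List.any_eq_true]

theorem pv_eq_alt : ∀ (n : Nat) (seq fe : List Int), seq.length ≤ n →
    find_next_sequence_part2 seq fe = find_next_sequence_part2_alt seq fe := by
  intro n
  induction n with
  | zero =>
    intro seq fe hle
    have : seq = [] := List.eq_nil_of_length_eq_zero (by omega)
    subst this
    rw [find_next_sequence_part2.eq_def, find_next_sequence_part2_alt.eq_def]
    simp
  | succ n ih =>
    intro seq fe hle
    rw [find_next_sequence_part2.eq_def, find_next_sequence_part2_alt.eq_def]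
    simp only [pv_diffs_eq]
    set ns := List.zipWith (fun a b : Int => b - a) seq (seq.drop 1) with hns
    have hlen : ns.length = min seq.length (seq.length - 1) := by
      simp [hns, List.length_zipWith]
    by_cases h0 : ns = []
    · simp [h0]
    · have hpos : 0 < ns.length := List.length_pos_iff.mpr h0
      rw [dif_neg h0, if_neg (by omega)]
      by_cases hz : ns.any (fun x => x ≠ 0) = true
      · rw [if_pos ((pv_any_ne_replicate ns).mpr hz), if_pos hz]
        have hhead : ns.getD 0 0 = ns.head h0 := by
          rw [List.getD_eq_getElem _ _ hpos, List.head_eq_getElem]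
        rw [hhead]
        exact ih ns _ (by omega)
      · rw [if_neg (fun hc => hz ((pv_any_ne_replicate ns).mp hc)), if_neg hz]

-- ===== VERDICT (by name: the statement is the Claim_ definition above) =====
theorem find_next_sequence_part2_spec : Claim_equal_find_next_sequence_part2 := by
  intro seq fe _
  unfold Spec_find_next_sequence_part2
  exact pv_eq_alt seq.length seq fe le_rfl
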